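-- pv_equiv track=rewrite | github.com/tfmortie/ribonanza | src/utils.py | sequence_encoder
-- ===== SOURCE A (Python) =====
-- BASE_MAPPING = {
--     "0": "000",
--     "A": "001",
--     "C": "010",
--     "G": "011",
--     "U": "100"
-- }
--
-- def sequence_encoder(x):
--     # first pad sequence
--     padding = ["0"]*((8-((len(x))%8))%8)
--     padding+=x
--     # now convert every base to bitstring
--     base_list_bitstring = list(map(lambda x: BASE_MAPPING[x], padding))
--     # convert to byte
--     seq_encoded = []
--     for i in range(0,len(base_list_bitstring)-7,8):
--         bitstring = "".join(base_list_bitstring[i:i+8])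
--         # get ascii chr for every byte
--         seq_encoded += [chr(int(bitstring[i:i+8],2)) for i in range(0, len(bitstring), 8)]
--     seq_encoded = "".join(seq_encoded)
--
--     return seq_encoded
-- ===== SOURCE B (Python) =====
-- BASE_CODE = {"0": 0, "A": 1, "C": 2, "G": 3, "U": 4}
--
-- def sequence_encoder(x):
--     # stream the 3-bit codes through an integer bit accumulator, emitting one
--     # output char whenever 8 bits are available; no bitstrings are built.
--     pad = (8 - len(x) % 8) % 8
--     out = ["\x00"] * (3 * pad // 8)
--     acc = 0
--     nbits = 3 * pad % 8
--     for b in x: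
--         acc = acc * 8 + BASE_CODE[b]
--         nbits += 3
--         if nbits >= 8:
--             nbits -= 8
--             q, acc = divmod(acc, 2 ** nbits)
--             out.append(chr(q))
--     return "".join(out)
-- ===== Notes on version B (the rewrite author's own statement) =====
-- stated objective: alternative
-- what changed: Replaces the pad-then-map-to-bitstrings-then-group-8-bases-and-reslice pipeline by a single streaming pass that folds each base's 3-bit code into an integer bit accumulator and emits a character whenever 8 bits are available; no bitstrings are built at all.
import Mathlib
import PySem

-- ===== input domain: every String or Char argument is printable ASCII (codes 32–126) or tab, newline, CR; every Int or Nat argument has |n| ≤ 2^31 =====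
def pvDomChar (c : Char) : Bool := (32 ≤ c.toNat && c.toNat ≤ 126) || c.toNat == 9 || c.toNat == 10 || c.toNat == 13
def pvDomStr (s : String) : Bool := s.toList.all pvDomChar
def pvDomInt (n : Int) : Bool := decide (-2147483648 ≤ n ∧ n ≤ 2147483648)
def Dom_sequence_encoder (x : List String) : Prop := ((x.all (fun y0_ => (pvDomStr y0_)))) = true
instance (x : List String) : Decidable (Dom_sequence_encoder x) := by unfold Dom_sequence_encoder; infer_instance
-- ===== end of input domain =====

-- B replaces A's pad / map-to-bitstrings / group-8-bases-and-reslice pipeline by one streaming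
-- fold with an integer bit accumulator (alternative decomposition, no bitstrings built).


-- ===== PORT A =====
def pvBASE_MAPPING : PySem.Dict String String :=
  PySem.Dict.ofList [("0", "000"), ("A", "001"), ("C", "010"), ("G", "011"), ("U", "100")]

-- int(s, 2): ported by hand as a left fold over the digit chars; exact on the nonempty
-- all-'0'/'1' strings this function feeds it.
def pvInt2 (cs : List Char) : Int :=
  cs.foldl (fun a c => 2 * a + (if c = '1' then 1 else 0)) 0

-- chr(n): exact for 0 ≤ n < 0xD800; here n is always a byte value
def pvChr (n : Int) : Char := Char.ofNat n.toNat

def sequence_encoder (x : List String) : String :=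
  let padding := List.replicate (PySem.Int.mod (8 - PySem.Int.mod (x.length : Int) 8) 8).toNat "0" ++ x
  -- BASE_MAPPING[x]: KeyError (excluded by Pre_) modelled by getD
  let base_list_bitstring := padding.map (fun b => (pvBASE_MAPPING.get? b).getD "")
  let seq_encoded : List String :=
    (PySem.List.pyRange 0 ((base_list_bitstring.length : Int) - 7) 8).foldl
      (fun acc i =>
        let bitstring := PySem.Str.join "" (PySem.List.slice base_list_bitstring (some i) (some (i + 8)))
        acc ++ (PySem.List.pyRange 0 (PySem.Str.len bitstring) 8).map
          (fun j => String.ofList [pvChr (pvInt2 (PySem.Str.slice bitstring (some j) (some (j + 8))).toList)]))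
      []
  PySem.Str.join "" seq_encoded

-- ===== PORT B =====
def pvBASE_CODE : PySem.Dict String Int :=
  PySem.Dict.ofList [("0", 0), ("A", 1), ("C", 2), ("G", 3), ("U", 4)]

-- the body of B's for-loop, on the state (acc, nbits, out)
def pvStepB (st : Int × Int × List Char) (b : String) : Int × Int × List Char :=
  -- acc = acc * 8 + BASE_CODE[b] (KeyError → getD, excluded by Pre_); nbits += 3
  let acc := st.1 * 8 + (pvBASE_CODE.get? b).getD 0
  let nbits := st.2.1 + 3
  if nbits ≥ 8 then
    -- q, acc = divmod(acc, 2 ** (nbits - 8)): divisor is a positive power of two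
    (PySem.Int.mod acc (2 ^ (nbits - 8).toNat), nbits - 8,
     st.2.2 ++ [pvChr (PySem.Int.floordiv acc (2 ^ (nbits - 8).toNat))])
  else (acc, nbits, st.2.2)

def sequence_encoder_alt (x : List String) : String :=
  let pad : Int := PySem.Int.mod (8 - PySem.Int.mod (x.length : Int) 8) 8
  let s := x.foldl pvStepB
    (0, PySem.Int.mod (3 * pad) 8, List.replicate (PySem.Int.floordiv (3 * pad) 8).toNat '\x00')
  String.ofList s.2.2

-- ===== PRECONDITION & SPEC =====
-- Pre_ = exactly the inputs where every base is a BASE_MAPPING key (otherwise Python A raises KeyError)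
def Pre_sequence_encoder (x : List String) : Prop :=
  ∀ s ∈ x, s = "0" ∨ s = "A" ∨ s = "C" ∨ s = "G" ∨ s = "U"
instance (x : List String) : Decidable (Pre_sequence_encoder x) := by
  unfold Pre_sequence_encoder; infer_instance

def pvWitness_sequence_encoder : List String := (["A", "C", "G", "U", "0", "A"])

def Spec_sequence_encoder (x : List String) (out : String) : Prop := out = sequence_encoder_alt x
instance (x : List String) (out : String) : Decidable (Spec_sequence_encoder x out) := by unfold Spec_sequence_encoder; infer_instance

-- ===== CLAIM (what is proved, stated in full; the proofs are below) =====
def Claim_equal_sequence_encoder : Prop := ∀ (x : List String), Dom_sequence_encoder x → Pre_sequence_encoder x → Spec_sequence_encoder x (sequence_encoder x)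

-- ===== LEMMAS AND PROOFS =====

-- bit value of a 0/1 string, on the Nat side
def natBin (cs : List Char) : Nat :=
  cs.foldl (fun a c => 2 * a + (if c = '1' then 1 else 0)) 0

-- the bit chars of one base
def pvCodeChars (b : String) : List Char := ((pvBASE_MAPPING.get? b).getD "").toList

-- chunk a bit list into bytes, 8 bits at a time
def pvBytes : List Char → List Char
  | c0 :: c1 :: c2 :: c3 :: c4 :: c5 :: c6 :: c7 :: rest =>
      pvChr (pvInt2 [c0, c1, c2, c3, c4, c5, c6, c7]) :: pvBytes rest
  | _ => []

-- the chars contributed by one iteration of A's outer loop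
def chA (ls : List String) (i : Int) : List Char :=
  (PySem.List.pyRange 0 (PySem.Str.len (PySem.Str.join "" (PySem.List.slice ls (some i) (some (i + 8))))) 8).map
    (fun j => pvChr (pvInt2 (PySem.Str.slice (PySem.Str.join "" (PySem.List.slice ls (some i) (some (i + 8)))) (some j) (some (j + 8))).toList))

theorem natBin_foldl (cs : List Char) (a : Nat) :
    cs.foldl (fun a c => 2 * a + (if c = '1' then 1 else 0)) a = a * 2 ^ cs.length + natBin cs := by
  induction cs generalizing a with
  | nil => simp [natBin]
  | cons c cs ih =>
    simp only [List.foldl_cons, List.length_cons]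
    rw [ih]
    have h2 : natBin (c :: cs) = (2 * 0 + if c = '1' then 1 else 0) * 2 ^ cs.length + natBin cs := by
      simpa [natBin] using ih (2 * 0 + if c = '1' then 1 else 0)
    rw [h2]; ring

theorem natBin_append (a b : List Char) :
    natBin (a ++ b) = natBin a * 2 ^ b.length + natBin b := by
  simp only [natBin, List.foldl_append]
  rw [natBin_foldl]; rfl

theorem natBin_lt (cs : List Char) : natBin cs < 2 ^ cs.length := by
  induction cs with
  | nil => simp [natBin]
  | cons c cs ih =>
    have h : natBin (c :: cs) = (2 * 0 + if c = '1' then 1 else 0) * 2 ^ cs.length + natBin cs := by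
      show List.foldl _ _ _ = _
      rw [List.foldl_cons, natBin_foldl]
    rw [h]; split <;> simp [List.length_cons, pow_succ] <;> omega

theorem pvInt2_eq (cs : List Char) : pvInt2 cs = (natBin cs : Int) := by
  suffices h : ∀ (a : Nat), cs.foldl (fun a c => 2 * a + (if c = '1' then 1 else 0)) ((a : Nat) : Int)
      = ((cs.foldl (fun a c => 2 * a + (if c = '1' then 1 else 0)) a : Nat) : Int) by
    simpa [pvInt2, natBin] using h 0
  induction cs with
  | nil => simp
  | cons c cs ih =>
    intro a
    simp only [List.foldl_cons]
    split <;> simpa using ih _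

theorem natBin_replicate_zero (n : Nat) : natBin (List.replicate n '0') = 0 := by
  induction n with
  | zero => rfl
  | succ n ih =>
    have h : natBin (List.replicate (n+1) '0') = natBin ('0' :: List.replicate n '0') := rfl
    rw [h]
    show List.foldl _ _ _ = 0
    rw [List.foldl_cons, natBin_foldl]
    simp [ih]

theorem pvBytes_append8 (a b : List Char) (h : a.length = 8) :
    pvBytes (a ++ b) = pvChr (pvInt2 a) :: pvBytes b := by
  match a, h with
  | [c0,c1,c2,c3,c4,c5,c6,c7], _ => rfl

theorem pvBytes_append (a b : List Char) (h : a.length % 8 = 0) :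
    pvBytes (a ++ b) = pvBytes a ++ pvBytes b := by
  rcases Nat.eq_zero_or_pos a.length with h0 | hpos
  · have ha : a = [] := List.eq_nil_of_length_eq_zero h0
    simp [ha, pvBytes]
  · have h8 : 8 ≤ a.length := by omega
    have ht : (a.take 8).length = 8 := by simp; omega
    have hsplit : a = a.take 8 ++ a.drop 8 := (List.take_append_drop 8 a).symm
    conv_lhs => rw [hsplit]
    conv_rhs => rw [hsplit]
    rw [List.append_assoc, pvBytes_append8 _ _ ht, pvBytes_append8 _ _ ht,
      pvBytes_append (a.drop 8) b (by simp; omega)]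
    simp
termination_by a.length
decreasing_by simp; omega

theorem pvBytes_replicate_zero (m : Nat) :
    pvBytes (List.replicate (8 * m) '0') = List.replicate m '\x00' := by
  induction m with
  | zero => rfl
  | succ m ih =>
    have h : 8 * (m + 1) = 8 + 8 * m := by ring
    rw [h, List.replicate_add, pvBytes_append8 _ _ (by simp), ih]
    rfl

theorem join_nil_flatten (parts : List (List Char)) :
    PySem.Chars.join [] parts = parts.flatten := by
  induction parts with
  | nil => rfl
  | cons a l ih =>
    cases l with
    | nil => simp [PySem.Chars.join_singleton]
    | cons b m => rw [PySem.Chars.join_cons_cons, List.flatten_cons, ← ih]; simp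

-- facts about the five admissible bases
theorem key_facts (b : String) (hb : b = "0" ∨ b = "A" ∨ b = "C" ∨ b = "G" ∨ b = "U") :
    (pvCodeChars b).length = 3 ∧ (pvBASE_CODE.get? b).getD 0 = (natBin (pvCodeChars b) : Int) := by
  rcases hb with h | h | h | h | h <;> subst h <;> exact ⟨by decide, by decide⟩

theorem code_zero : pvCodeChars "0" = ['0', '0', '0'] := by decide

theorem flatten_len3 (ls : List (List Char)) (h : ∀ l ∈ ls, l.length = 3) :
    ls.flatten.length = 3 * ls.length := by
  induction ls with
  | nil => simp
  | cons a l ih =>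
    simp only [List.flatten_cons, List.length_append, List.length_cons, h a (by simp)]
    rw [ih (fun l hl => h l (by simp [hl]))]
    ring

theorem flatten_replicate_code (n : Nat) :
    (List.replicate n ['0', '0', '0'] : List (List Char)).flatten = List.replicate (3 * n) '0' := by
  induction n with
  | zero => rfl
  | succ n ih =>
    rw [List.replicate_succ, List.flatten_cons, ih]
    have h : 3 * (n + 1) = 3 + 3 * n := by ring
    rw [h, List.replicate_add]
    rfl

theorem pyRange8 (k : Nat) :
    PySem.List.pyRange 0 (8 * (k : Int) - 7) 8 = (List.range k).map (fun m : Nat => (8 * (m : Int))) := by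
  rw [PySem.List.pyRange_of_pos _ _ (by norm_num : (0:Int) < 8)]
  rcases Nat.eq_zero_or_pos k with h0 | hpos
  · subst h0; simp
  · have hk1 : (1 : Int) ≤ (k : Int) := by exact_mod_cast hpos
    have hlt : (0 : Int) < 8 * (k : Int) - 7 := by omega
    rw [if_pos hlt]
    have he : (8 * (k : Int) - 7 - 0 + 8 - 1) = 8 * (k : Int) := by ring
    have hq : ((8 * (k : Int) - 7 - 0 + 8 - 1) / 8).toNat = k := by
      rw [he, Int.mul_ediv_cancel_left _ (by norm_num)]; simp
    rw [hq]
    exact List.map_congr_left (fun a _ => by ring)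

theorem pvBytes24 (bs : List Char) (h : bs.length = 24) :
    pvBytes bs = [pvChr (pvInt2 (bs.take 8)), pvChr (pvInt2 ((bs.drop 8).take 8)),
      pvChr (pvInt2 ((bs.drop 16).take 8))] := by
  have h1 : (bs.take 8).length = 8 := by simp; omega
  have h2 : ((bs.drop 8).take 8).length = 8 := by simp; omega
  have h3 : ((bs.drop 16).take 8).length = 8 := by simp; omega
  have e1 : bs = bs.take 8 ++ bs.drop 8 := (List.take_append_drop 8 bs).symm
  have e2 : bs.drop 8 = (bs.drop 8).take 8 ++ bs.drop 16 := by
    conv_lhs => rw [← List.take_append_drop 8 (List.drop 8 bs)]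
    rw [List.drop_drop]
  have e3 : bs.drop 16 = (bs.drop 16).take 8 ++ ([] : List Char) := by
    rw [List.take_of_length_le (show (List.drop 16 bs).length ≤ 8 by simp [h]), List.append_nil]
  conv_lhs => rw [e1, pvBytes_append8 _ _ h1, e2, pvBytes_append8 _ _ h2, e3,
    pvBytes_append8 _ _ h3]
  rfl

theorem chA_shift (a rest : List String) (h8 : a.length = 8) (m : Nat) :
    chA (a ++ rest) (8 * ((m : Int) + 1)) = chA rest (8 * (m : Int)) := by
  have hs : PySem.List.slice (a ++ rest) (some (8 * ((m : Int) + 1))) (some (8 * ((m : Int) + 1) + 8))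
      = PySem.List.slice rest (some (8 * (m : Int))) (some (8 * (m : Int) + 8)) := by
    have c1 : 8 * ((m : Int) + 1) = ((8 * m + 8 : Nat) : Int) := by push_cast; ring
    have c2 : 8 * ((m : Int) + 1) + 8 = ((8 * m + 16 : Nat) : Int) := by push_cast; ring
    have c3 : 8 * (m : Int) = ((8 * m : Nat) : Int) := by push_cast; ring
    have c4 : 8 * (m : Int) + 8 = ((8 * m + 8 : Nat) : Int) := by push_cast; ring
    rw [c2, c1, c4, c3, PySem.List.slice_natCast, PySem.List.slice_natCast]
    have hdr : (8 * m + 8) = a.length + 8 * m := by omega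
    rw [hdr, List.drop_append,
      List.drop_eq_nil_of_le (by omega : a.length ≤ a.length + 8 * m)]
    simp
    omega
  unfold chA
  rw [hs]

theorem chA_zero (g rest : List String) (h8 : g.length = 8)
    (h3 : ∀ l ∈ g, l.toList.length = 3) :
    chA (g ++ rest) 0 = pvBytes ((g.map (fun s => s.toList)).flatten) := by
  have hb24 : ((g.map (fun s => s.toList)).flatten).length = 24 := by
    rw [flatten_len3 _ (by simpa using h3)]
    simp [h8]
  have hsl : PySem.List.slice (g ++ rest) (some 0) (some (0 + 8)) = g := by
    rw [PySem.List.slice_zero_start,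
      show ((0:Int) + 8) = ((8 : Nat) : Int) from by norm_num,
      PySem.List.slice_to_natCast,
      List.take_append_of_le_length (by omega), List.take_of_length_le (by omega)]
  have hJ : (PySem.Str.join "" g).toList = (g.map (fun s => s.toList)).flatten := by
    rw [PySem.Str.toList_join,
      show ("" : String).toList = ([] : List Char) from rfl, join_nil_flatten]
  unfold chA
  rw [hsl, PySem.Str.len_eq, hJ, hb24,
    show (((24 : Nat) : Int)) = (24 : Int) from rfl,
    show PySem.List.pyRange 0 24 8 = [0, 8, 16] from by decide]
  simp only [List.map_cons, List.map_nil]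
  rw [pvBytes24 _ hb24]
  have hc : ∀ (a b : Nat) (w : List Char), PySem.Chars.slice w (some (a : Int)) (some (b : Int))
      = (w.drop a).take (b - a) := fun a b w => PySem.List.slice_natCast w a b
  have s1 : (PySem.Str.slice (PySem.Str.join "" g) (some 0) (some (0 + 8))).toList
      = ((g.map (fun s => s.toList)).flatten).take 8 := by
    rw [PySem.Str.toList_slice, hJ,
      show ((0 : Int)) = ((0 : Nat) : Int) from rfl,
      show (((0 : Nat) : Int) + 8) = ((8 : Nat) : Int) from by norm_num, hc]
    simp
  have s2 : (PySem.Str.slice (PySem.Str.join "" g) (some 8) (some (8 + 8))).toList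
      = (((g.map (fun s => s.toList)).flatten).drop 8).take 8 := by
    rw [PySem.Str.toList_slice, hJ,
      show ((8 : Int) + 8) = ((16 : Nat) : Int) from by norm_num,
      show ((8 : Int)) = ((8 : Nat) : Int) from rfl, hc]
  have s3 : (PySem.Str.slice (PySem.Str.join "" g) (some 16) (some (16 + 8))).toList
      = (((g.map (fun s => s.toList)).flatten).drop 16).take 8 := by
    rw [PySem.Str.toList_slice, hJ,
      show ((16 : Int) + 8) = ((24 : Nat) : Int) from by norm_num,
      show ((16 : Int)) = ((16 : Nat) : Int) from rfl, hc]
  rw [s1, s2, s3]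

theorem A_loop (k : Nat) (ls : List String) (hlen : ls.length = 8 * k)
    (h3 : ∀ l ∈ ls, l.toList.length = 3) :
    (List.range k).flatMap (fun m : Nat => chA ls (8 * (m : Int))) =
      pvBytes ((ls.map (fun s => s.toList)).flatten) := by
  induction k generalizing ls with
  | zero =>
    have hnil : ls = [] := List.eq_nil_of_length_eq_zero (by omega)
    subst hnil; simp [pvBytes]
  | succ k ih =>
    have h8 : (ls.take 8).length = 8 := by simp; omega
    have hsplit : ls = ls.take 8 ++ ls.drop 8 := (List.take_append_drop 8 ls).symm
    have hrest : (ls.drop 8).length = 8 * k := by simp; omega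
    have h3a : ∀ l ∈ ls.take 8, l.toList.length = 3 := fun l hl => h3 l (List.mem_of_mem_take hl)
    have h3r : ∀ l ∈ ls.drop 8, l.toList.length = 3 := fun l hl => h3 l (List.mem_of_mem_drop hl)
    have h24 : (((ls.take 8).map (fun s => s.toList)).flatten).length = 24 := by
      rw [flatten_len3 _ (by intro l hl; rcases List.mem_map.mp hl with ⟨t, ht, rfl⟩; exact h3a t ht),
        List.length_map, h8]
    rw [List.range_succ_eq_map, List.flatMap_cons, List.flatMap_map]
    have hz : chA ls (8 * ((0 : Nat) : Int)) = pvBytes (((ls.take 8).map (fun s => s.toList)).flatten) := by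
      rw [show (8 * ((0 : Nat) : Int)) = (0 : Int) from by simp]
      conv_lhs => rw [hsplit]
      exact chA_zero (ls.take 8) (ls.drop 8) h8 h3a
    have hsh : ∀ m : Nat, chA ls (8 * ((Nat.succ m : Nat) : Int))
        = chA (ls.drop 8) (8 * (m : Int)) := by
      intro m
      rw [show ((Nat.succ m : Nat) : Int) = (m : Int) + 1 from by push_cast; ring]
      conv_lhs => rw [hsplit]
      exact chA_shift _ _ h8 m
    rw [hz, List.flatMap_def, List.map_congr_left (fun m _ => hsh m)]
    have ihr := ih (ls.drop 8) hrest h3r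
    rw [List.flatMap_def] at ihr
    rw [ihr]
    conv_rhs => rw [hsplit]
    rw [List.map_append, List.flatten_append, pvBytes_append _ _ (by rw [h24])]

theorem B_loop (xs : List String) (done r : List Char)
    (hk : ∀ b ∈ xs, b = "0" ∨ b = "A" ∨ b = "C" ∨ b = "G" ∨ b = "U")
    (hd : done.length % 8 = 0) (hr : r.length < 8) :
    ∃ done' r' : List Char,
      done' ++ r' = done ++ r ++ (xs.map pvCodeChars).flatten ∧
      done'.length % 8 = 0 ∧ r'.length < 8 ∧
      xs.foldl pvStepB ((natBin r : Int), ((r.length : Nat) : Int), pvBytes done)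
      = ((natBin r' : Int), ((r'.length : Nat) : Int), pvBytes done') := by
  induction xs generalizing done r with
  | nil => exact ⟨done, r, by simp, hd, hr, by simp⟩
  | cons b xs ih =>
    obtain ⟨hc3, hcv⟩ := key_facts b (hk b (by simp))
    have hkxs : ∀ b' ∈ xs, b' = "0" ∨ b' = "A" ∨ b' = "C" ∨ b' = "G" ∨ b' = "U" :=
      fun b' hb' => hk b' (by simp [hb'])
    have hlenrc : (r ++ pvCodeChars b).length = r.length + 3 := by simp [hc3]
    have hacc : (natBin r : Int) * 8 + (pvBASE_CODE.get? b).getD 0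
        = ((natBin (r ++ pvCodeChars b) : Nat) : Int) := by
      rw [hcv, natBin_append, hc3]; push_cast; ring
    rw [List.foldl_cons]
    by_cases hcase : 5 ≤ r.length
    · -- a byte is emitted
      have hcond : ((r.length : Nat) : Int) + 3 ≥ 8 := by
        have : (5 : Int) ≤ ((r.length : Nat) : Int) := by exact_mod_cast hcase
        omega
      have hfirst : ((r ++ pvCodeChars b).take 8).length = 8 := by
        simp [hlenrc]; omega
      have hrest2 : ((r ++ pvCodeChars b).drop 8).length = r.length + 3 - 8 := by
        simp [hlenrc]
      have hsplit2 : (r ++ pvCodeChars b).take 8 ++ (r ++ pvCodeChars b).drop 8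
          = r ++ pvCodeChars b := List.take_append_drop 8 _
      have htoNat : (((r.length : Nat) : Int) + 3 - 8).toNat = r.length + 3 - 8 := by omega
      have hnb : natBin (r ++ pvCodeChars b)
          = 2 ^ (r.length + 3 - 8) * natBin ((r ++ pvCodeChars b).take 8)
            + natBin ((r ++ pvCodeChars b).drop 8) := by
        conv_lhs => rw [← hsplit2]
        rw [natBin_append, hrest2, Nat.mul_comm]
      have hlt2 : natBin ((r ++ pvCodeChars b).drop 8) < 2 ^ (r.length + 3 - 8) := by
        have := natBin_lt ((r ++ pvCodeChars b).drop 8)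
        rwa [hrest2] at this
      have hpow : ((2 : Int) ^ (r.length + 3 - 8)) = (((2 ^ (r.length + 3 - 8) : Nat) : Nat) : Int) := by
        push_cast; ring
      have hdiv : PySem.Int.floordiv ((natBin (r ++ pvCodeChars b) : Nat) : Int)
            (2 ^ (r.length + 3 - 8))
          = ((natBin ((r ++ pvCodeChars b).take 8) : Nat) : Int) := by
        rw [hpow, PySem.Int.floordiv_natCast, hnb]
        rw [Nat.mul_add_div (Nat.two_pow_pos _), Nat.div_eq_of_lt hlt2,
          Nat.add_zero]
      have hmod : PySem.Int.mod ((natBin (r ++ pvCodeChars b) : Nat) : Int)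
            (2 ^ (r.length + 3 - 8))
          = ((natBin ((r ++ pvCodeChars b).drop 8) : Nat) : Int) := by
        rw [hpow, PySem.Int.mod_natCast, hnb, Nat.mul_add_mod, Nat.mod_eq_of_lt hlt2]
      have hstep : pvStepB ((natBin r : Int), ((r.length : Nat) : Int), pvBytes done) b
          = ((natBin ((r ++ pvCodeChars b).drop 8) : Int),
             ((((r ++ pvCodeChars b).drop 8).length : Nat) : Int),
             pvBytes (done ++ (r ++ pvCodeChars b).take 8)) := by
        show (if ((r.length : Nat) : Int) + 3 ≥ 8 then _ else _) = _
        rw [if_pos hcond]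
        have e1 : pvBytes (done ++ (r ++ pvCodeChars b).take 8)
            = pvBytes done ++ [pvChr (pvInt2 ((r ++ pvCodeChars b).take 8))] := by
          rw [pvBytes_append _ _ hd]
          have := pvBytes_append8 ((r ++ pvCodeChars b).take 8) [] hfirst
          simp only [List.append_nil] at this
          rw [this]
          rfl
        rw [e1]
        refine Prod.ext ?_ (Prod.ext ?_ ?_)
        · show PySem.Int.mod ((natBin r : Int) * 8 + (pvBASE_CODE.get? b).getD 0)
              (2 ^ ((((r.length : Nat) : Int) + 3 - 8)).toNat) = _
          rw [hacc, htoNat, hmod]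
        · show ((r.length : Nat) : Int) + 3 - 8 = _
          rw [hrest2]; push_cast; omega
        · show pvBytes done ++ [pvChr (PySem.Int.floordiv ((natBin r : Int) * 8 + (pvBASE_CODE.get? b).getD 0) (2 ^ ((((r.length : Nat) : Int) + 3 - 8)).toNat))] = _
          rw [hacc, htoNat, hdiv, pvInt2_eq]
      rw [hstep]
      obtain ⟨done', r', heq, hd', hr', hfold⟩ :=
        ih (done ++ (r ++ pvCodeChars b).take 8) ((r ++ pvCodeChars b).drop 8) hkxs
          (by simp [hfirst]; omega) (by rw [hrest2]; omega)
      refine ⟨done', r', ?_, hd', hr', hfold⟩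
      rw [heq]
      simp only [List.map_cons, List.flatten_cons, List.append_assoc]
      rw [← List.append_assoc ((r ++ pvCodeChars b).take 8), hsplit2]
      simp [List.append_assoc]
    · -- no byte yet
      have hcond : ¬ (((r.length : Nat) : Int) + 3 ≥ 8) := by
        have : ((r.length : Nat) : Int) ≤ 4 := by exact_mod_cast (by omega : r.length ≤ 4)
        omega
      have hstep : pvStepB ((natBin r : Int), ((r.length : Nat) : Int), pvBytes done) b
          = ((natBin (r ++ pvCodeChars b) : Int),
             (((r ++ pvCodeChars b).length : Nat) : Int), pvBytes done) := by
        show (if ((r.length : Nat) : Int) + 3 ≥ 8 then _ else _) = _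
        rw [if_neg hcond]
        refine Prod.ext ?_ (Prod.ext ?_ rfl)
        · exact hacc
        · show ((r.length : Nat) : Int) + 3 = _
          rw [hlenrc]; push_cast; ring
      rw [hstep]
      obtain ⟨done', r', heq, hd', hr', hfold⟩ :=
        ih done (r ++ pvCodeChars b) hkxs hd (by rw [hlenrc]; omega)
      refine ⟨done', r', ?_, hd', hr', hfold⟩
      rw [heq]
      simp [List.append_assoc]

theorem flatten_map_flatMap {α β γ : Type} (r : List α) (g : α → List β) (f : β → List γ) :
    ((r.flatMap g).map f).flatten = r.flatMap (fun a => ((g a).map f).flatten) := by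
  induction r with
  | nil => simp
  | cons a l ih => simp [List.flatMap_cons, ih]

theorem flatten_singleton {α β : Type} (l : List α) (c : α → β) :
    (l.map (fun j => [c j])).flatten = l.map c := by
  induction l with
  | nil => rfl
  | cons a l ih => simp [ih]

theorem A_eq (ls : List String) (k : Nat) (hlen : ls.length = 8 * k)
    (h3 : ∀ l ∈ ls, l.toList.length = 3) :
    (PySem.Str.join "" ((PySem.List.pyRange 0 ((ls.length : Int) - 7) 8).foldl
        (fun acc i => acc ++ (PySem.List.pyRange 0 (PySem.Str.len (PySem.Str.join "" (PySem.List.slice ls (some i) (some (i + 8))))) 8).map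
            (fun j => String.ofList [pvChr (pvInt2 (PySem.Str.slice (PySem.Str.join "" (PySem.List.slice ls (some i) (some (i + 8)))) (some j) (some (j + 8))).toList)]))
        [])).toList = pvBytes ((ls.map (fun s => s.toList)).flatten) := by
  rw [PySem.List.foldl_append_eq_flatMap]
  simp only [List.nil_append]
  rw [PySem.Str.toList_join, show ("" : String).toList = ([] : List Char) from rfl, join_nil_flatten]
  rw [show ((ls.length : Int)) - 7 = 8 * (k : Int) - 7 from by rw [hlen]; push_cast; ring]
  rw [pyRange8, List.flatMap_map, flatten_map_flatMap]
  simp only [List.map_map, Function.comp_def, String.toList_ofList, flatten_singleton]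
  exact A_loop k ls hlen h3

-- ===== VERDICT (by name: the statement is the Claim_ definition above) =====
theorem sequence_encoder_spec : Claim_equal_sequence_encoder := by
  intro x _ hpre
  show sequence_encoder x = sequence_encoder_alt x
  refine String.toList_inj.mp ?_
  simp only [sequence_encoder, sequence_encoder_alt]
  set padI : Int := PySem.Int.mod (8 - PySem.Int.mod ((x.length : Nat) : Int) 8) 8 with hpadI
  have hpadb : 0 ≤ padI ∧ padI < 8 := by
    rw [hpadI, PySem.Int.mod_eq_emod_of_pos (by norm_num : (0:Int) < 8),
      PySem.Int.mod_eq_emod_of_pos (by norm_num : (0:Int) < 8)]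
    omega
  set pn := padI.toNat with hpn
  have hpi : (pn : Int) = padI := Int.toNat_of_nonneg hpadb.1
  have hmod8 : (pn + x.length) % 8 = 0 := by
    have h1 : padI = (8 - ((x.length : Nat) : Int) % 8) % 8 := by
      rw [hpadI, PySem.Int.mod_eq_emod_of_pos (by norm_num : (0:Int) < 8),
        PySem.Int.mod_eq_emod_of_pos (by norm_num : (0:Int) < 8)]
    omega
  set P := List.replicate pn "0" ++ x with hP
  have hPlen : P.length = pn + x.length := by simp [hP]
  have hPkey : ∀ b ∈ P, b = "0" ∨ b = "A" ∨ b = "C" ∨ b = "G" ∨ b = "U" := by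
    intro b hb
    rcases List.mem_append.mp hb with h | h
    · exact Or.inl (List.eq_of_mem_replicate h)
    · exact hpre b h
  have h3 : ∀ l ∈ P.map (fun b => (pvBASE_MAPPING.get? b).getD ""), l.toList.length = 3 := by
    intro l hl
    rcases List.mem_map.mp hl with ⟨b, hb, rfl⟩
    exact (key_facts b (hPkey b hb)).1
  have hPlen8 : (P.map (fun b => (pvBASE_MAPPING.get? b).getD "")).length = 8 * ((pn + x.length) / 8) := by
    rw [List.length_map, hPlen]; omega
  rw [A_eq (P.map (fun b => (pvBASE_MAPPING.get? b).getD "")) ((pn + x.length) / 8) hPlen8 h3]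
  -- B side
  have h3p : 3 * padI = ((3 * pn : Nat) : Int) := by rw [← hpi]; push_cast; ring
  rw [h3p, show (8 : Int) = ((8 : Nat) : Int) from rfl, PySem.Int.mod_natCast, PySem.Int.floordiv_natCast,
    show ((((3 * pn) / 8 : Nat) : Int)).toNat = (3 * pn) / 8 from Int.toNat_natCast _,
    show (0 : Int) = ((natBin (List.replicate ((3 * pn) % 8) '0') : Nat) : Int) from by
      rw [natBin_replicate_zero]; simp,
    show (((3 * pn) % 8 : Nat) : Int) = (((List.replicate ((3 * pn) % 8) '0').length : Nat) : Int) from by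
      simp,
    show List.replicate ((3 * pn) / 8) '\x00' = pvBytes (List.replicate (8 * ((3 * pn) / 8)) '0') from
      (pvBytes_replicate_zero _).symm]
  obtain ⟨done', r', heq, hd', hr', hfold⟩ :=
    B_loop x (List.replicate (8 * ((3 * pn) / 8)) '0') (List.replicate ((3 * pn) % 8) '0') hpre
      (by simp) (by simp; omega)
  rw [hfold]
  -- identify done' with the full padded bit list
  have hF3 : ∀ l ∈ P.map pvCodeChars, l.length = 3 := by
    intro l hl
    rcases List.mem_map.mp hl with ⟨b, hb, rfl⟩
    exact (key_facts b (hPkey b hb)).1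
  have htot : done' ++ r' = (P.map pvCodeChars).flatten := by
    rw [heq]
    have hPm : P.map pvCodeChars = List.replicate pn (['0','0','0'] : List Char) ++ x.map pvCodeChars := by
      rw [hP, List.map_append, List.map_replicate, code_zero]
    rw [hPm, List.flatten_append, flatten_replicate_code, ← List.replicate_add]
    congr 2
    omega
  have hlenF : ((P.map pvCodeChars).flatten).length % 8 = 0 := by
    rw [flatten_len3 _ hF3, List.length_map, hPlen]
    omega
  have hl := congrArg List.length htot
  simp only [List.length_append] at hl
  have hr0 : r' = [] := List.eq_nil_of_length_eq_zero (by omega)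
  have hdone : done' = (P.map pvCodeChars).flatten := by
    rw [hr0, List.append_nil] at htot
    exact htot
  have hmm : (P.map (fun b => (pvBASE_MAPPING.get? b).getD "")).map (fun s => s.toList)
      = P.map pvCodeChars := by
    rw [List.map_map]; rfl
  rw [hmm, hdone]
  simp
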